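-- pv_equiv track=rewrite | github.com/ericmerle3789/Collatz-Junction-Theorem | scripts/research/r54_induction_last.py | enumerate_sub_PB
-- ===== SOURCE A (Python) =====
-- from itertools import combinations_with_replacement
--
-- def enumerate_sub_PB(k_sub, p, b_max, g_full_k=None, k_full=None):
--     """Enumerate P_{sub}(g) for monotone sub-vectors of length k_sub in [0, b_max].
--     P_{sub}(g) = Sum_{j=0}^{k_sub-1} g^j * 2^{B_j} mod p.
--
--     IMPORTANT: g = 2^S * 3^{-k} mod p depends on the FULL k, not k_sub.
--     The sub-polynomial uses g^0, ..., g^{k_sub-1} with the SAME g as the full problem.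
--
--     Returns list of (B_tuple, P_sub_value).
--     """
--     if g_full_k is None:
--         return []
--
--     g = g_full_k
--     g_pows = [pow(g, j, p) for j in range(k_sub)]
--     two_pows = [pow(2, b, p) for b in range(b_max + 1)]
--
--     results = []
--     for B in combinations_with_replacement(range(b_max + 1), k_sub):
--         val = 0
--         for j in range(k_sub):
--             val = (val + g_pows[j] * two_pows[B[j]]) % p
--         results.append((B, val))
--     return results
-- ===== SOURCE B (Python) =====
-- def enumerate_sub_PB(k_sub, p, b_max, g_full_k=None, k_full=None):
--     """Recursive DFS over non-decreasing tuples, carrying the partial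
--     polynomial value down the recursion instead of re-folding each tuple."""
--     if g_full_k is None:
--         return []
--     g = g_full_k
--     g_pows = [pow(g, j, p) for j in range(k_sub)]
--     two_pows = [pow(2, b, p) for b in range(b_max + 1)]
--
--     def dfs(gp, start, prefix, val):
--         if not gp:
--             return [(prefix, val)]
--         out = []
--         for b in range(start, b_max + 1):
--             out.extend(dfs(gp[1:], b, prefix + (b,), (val + gp[0] * two_pows[b]) % p))
--         return out
--
--     return dfs(g_pows, 0, (), 0)
-- ===== Notes on version B (the rewrite author's own statement) =====
-- stated objective: alternative
-- what changed: Replaces itertools.combinations_with_replacement plus a per-tuple inner re-folding loop with a recursive DFS that emits non-decreasing tuples in the same lexicographic order while threading the partial polynomial value (val + gp[0]*two_pows[b]) % p down the recursion, so each tuple's value is never recomputed from scratch.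
import Mathlib
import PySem

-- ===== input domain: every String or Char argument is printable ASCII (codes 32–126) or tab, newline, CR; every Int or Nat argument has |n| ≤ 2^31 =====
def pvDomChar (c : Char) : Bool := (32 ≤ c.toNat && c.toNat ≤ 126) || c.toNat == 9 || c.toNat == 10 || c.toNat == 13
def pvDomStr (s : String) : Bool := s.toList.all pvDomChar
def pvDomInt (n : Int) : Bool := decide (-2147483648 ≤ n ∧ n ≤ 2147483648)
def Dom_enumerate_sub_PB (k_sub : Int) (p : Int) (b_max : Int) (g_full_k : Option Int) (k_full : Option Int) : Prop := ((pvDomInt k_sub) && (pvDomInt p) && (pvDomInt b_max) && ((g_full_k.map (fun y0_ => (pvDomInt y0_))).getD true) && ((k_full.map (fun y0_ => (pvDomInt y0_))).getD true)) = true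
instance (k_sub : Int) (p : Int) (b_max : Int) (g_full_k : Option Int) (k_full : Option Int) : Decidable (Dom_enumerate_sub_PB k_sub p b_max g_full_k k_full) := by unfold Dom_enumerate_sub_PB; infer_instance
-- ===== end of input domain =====

-- B replaces combinations_with_replacement + a per-tuple inner re-folding loop by a recursive DFS
-- that threads the partial polynomial value down the recursion (objective: alternative, same cost).


-- ===== PORT A =====
-- pow(a, n, p) for a nonnegative exponent: a^n followed by Python's % (divisor-sign mod);
-- exact on Pre_ (p ≠ 0 whenever pow is reached)
def pyPowMod (a : Int) (n : Nat) (p : Int) : Int := PySem.Int.mod (a ^ n) p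

-- itertools.combinations_with_replacement over a list, in the library's lexicographic order
def cwr : List Int → Nat → List (List Int)
  | _, 0 => [[]]
  | [], _ + 1 => []
  | x :: rest, n + 1 =>
      ((cwr (x :: rest) n).map (fun t => x :: t)) ++ cwr rest (n + 1)
  termination_by xs n => (n, xs.length)

def enumerate_sub_PB (k_sub : Int) (p : Int) (b_max : Int) (g_full_k : Option Int) (k_full : Option Int) : List (List Int × Int) :=
  match g_full_k with
  | none => []
  | some g =>
    let g_pows := (PySem.List.pyRange 0 k_sub 1).map (fun j => pyPowMod g j.toNat p)
    let two_pows := (PySem.List.pyRange 0 (b_max + 1) 1).map (fun b => pyPowMod 2 b.toNat p)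
    (cwr (PySem.List.pyRange 0 (b_max + 1) 1) k_sub.toNat).map (fun B =>
      (B, (PySem.List.pyRange 0 k_sub 1).foldl
            (fun val j =>
              PySem.Int.mod
                (val + PySem.List.pyGetD g_pows j 0 *
                       PySem.List.pyGetD two_pows (PySem.List.pyGetD B j 0) 0) p) 0))

-- ===== PORT B =====
-- dfs(gp, start, prefix, val) from Source B: structural recursion on the remaining coefficient list
def dfsB (p : Int) (b_max : Int) (two_pows : List Int) : List Int → Int → List Int → Int → List (List Int × Int)
  | [], _, pre, val => [(pre, val)]
  | gh :: gt, start, pre, val =>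
      (PySem.List.pyRange start (b_max + 1) 1).foldl
        (fun out b =>
          out ++ dfsB p b_max two_pows gt b (pre ++ [b])
                  (PySem.Int.mod (val + gh * PySem.List.pyGetD two_pows b 0) p)) []

def enumerate_sub_PB_alt (k_sub : Int) (p : Int) (b_max : Int) (g_full_k : Option Int) (k_full : Option Int) : List (List Int × Int) :=
  match g_full_k with
  | none => []
  | some g =>
    let g_pows := (PySem.List.pyRange 0 k_sub 1).map (fun j => pyPowMod g j.toNat p)
    let two_pows := (PySem.List.pyRange 0 (b_max + 1) 1).map (fun b => pyPowMod 2 b.toNat p)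
    dfsB p b_max two_pows g_pows 0 [] 0

-- ===== PRECONDITION & SPEC =====
-- Pre_ excludes exactly the inputs where Python A raises: k_sub < 0 (ValueError from
-- combinations_with_replacement) and p = 0 with pow() reached (ValueError), i.e. unless
-- k_sub = 0 ∧ b_max < 0, where no pow is computed and A returns [((), 0)].
def Pre_enumerate_sub_PB (k_sub : Int) (p : Int) (b_max : Int) (g_full_k : Option Int) (k_full : Option Int) : Prop :=
  g_full_k = none ∨ (0 ≤ k_sub ∧ (p ≠ 0 ∨ (k_sub = 0 ∧ b_max < 0)))
instance (k_sub : Int) (p : Int) (b_max : Int) (g_full_k : Option Int) (k_full : Option Int) : Decidable (Pre_enumerate_sub_PB k_sub p b_max g_full_k k_full) := by unfold Pre_enumerate_sub_PB; infer_instance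

def pvWitness_enumerate_sub_PB : Int × Int × Int × Option Int × Option Int := (2, 7, 2, some 3, none)

def Spec_enumerate_sub_PB (k_sub : Int) (p : Int) (b_max : Int) (g_full_k : Option Int) (k_full : Option Int) (out : List (List Int × Int)) : Prop := out = enumerate_sub_PB_alt k_sub p b_max g_full_k k_full
instance (k_sub : Int) (p : Int) (b_max : Int) (g_full_k : Option Int) (k_full : Option Int) (out : List (List Int × Int)) : Decidable (Spec_enumerate_sub_PB k_sub p b_max g_full_k k_full out) := by unfold Spec_enumerate_sub_PB; infer_instance

-- ===== CLAIM (what is proved, stated in full; the proofs are below) =====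
def Claim_equal_enumerate_sub_PB : Prop := ∀ (k_sub : Int) (p : Int) (b_max : Int) (g_full_k : Option Int) (k_full : Option Int), Dom_enumerate_sub_PB k_sub p b_max g_full_k k_full → Pre_enumerate_sub_PB k_sub p b_max g_full_k k_full → Spec_enumerate_sub_PB k_sub p b_max g_full_k k_full (enumerate_sub_PB k_sub p b_max g_full_k k_full)

-- ===== LEMMAS AND PROOFS =====

-- the partial value B threads down the recursion, read off a coefficient/exponent pair list
def valFold (tp : List Int) (p : Int) : List Int → List Int → Int → Int
  | [], _, val => val
  | _ :: _, [], val => val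
  | gh :: gt, b :: bs, val =>
      valFold tp p gt bs (PySem.Int.mod (val + gh * PySem.List.pyGetD tp b 0) p)

theorem cwr_length_mem : ∀ (xs : List Int) (n : Nat) (B : List Int), B ∈ cwr xs n → B.length = n := by
  intro xs n
  induction xs, n using cwr.induct with
  | case1 xs => intro B hB; simp [cwr] at hB; simp [hB]
  | case2 n => intro B hB; simp [cwr] at hB
  | case3 x rest n ih1 ih2 =>
      intro B hB
      simp only [cwr, List.mem_append, List.mem_map] at hB
      rcases hB with ⟨t, ht, rfl⟩ | h
      · simp [ih1 t ht]
      · exact ih2 B h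

theorem dfsB_cons (p b_max : Int) (tp : List Int) (gh : Int) (gt : List Int)
    (start : Int) (pre : List Int) (val : Int) :
    dfsB p b_max tp (gh :: gt) start pre val =
      (PySem.List.pyRange start (b_max + 1) 1).flatMap
        (fun b => dfsB p b_max tp gt b (pre ++ [b])
                    (PySem.Int.mod (val + gh * PySem.List.pyGetD tp b 0) p)) := by
  simp [dfsB, PySem.List.foldl_append_eq_flatMap, List.flatMap]

theorem dfs_spec (p b_max : Int) (tp : List Int) :
    ∀ (gp : List Int) (n : Nat) (start : Int) (pre : List Int) (val : Int),
      (b_max + 1 - start).toNat ≤ n →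
      dfsB p b_max tp gp start pre val =
        (cwr (PySem.List.pyRange start (b_max + 1) 1) gp.length).map
          (fun B => (pre ++ B, valFold tp p gp B val)) := by
  intro gp
  induction gp with
  | nil =>
      intro n start pre val _
      simp [dfsB, cwr, valFold]
  | cons gh gt ih =>
      intro n
      induction n with
      | zero =>
          intro start pre val hn
          have hle : b_max + 1 ≤ start := by omega
          rw [PySem.List.pyRange_one_eq_nil hle]
          simp [dfsB, PySem.List.pyRange_one_eq_nil hle, cwr]
      | succ m ihm =>
          intro start pre val hn
          by_cases h : start < b_max + 1
          · rw [dfsB_cons, PySem.List.pyRange_one_cons h, List.flatMap_cons]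
            have hrest : (PySem.List.pyRange (start + 1) (b_max + 1) 1).flatMap
                (fun b => dfsB p b_max tp gt b (pre ++ [b])
                    (PySem.Int.mod (val + gh * PySem.List.pyGetD tp b 0) p))
                = dfsB p b_max tp (gh :: gt) (start + 1) pre val := (dfsB_cons ..).symm
            rw [hrest, ih (n := (b_max + 1 - start).toNat) start (pre ++ [start])
                  (PySem.Int.mod (val + gh * PySem.List.pyGetD tp start 0) p) le_rfl,
                ihm (start + 1) pre val (by omega)]
            have hcwr : cwr (start :: PySem.List.pyRange (start + 1) (b_max + 1) 1) (gh :: gt).length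
                = ((cwr (PySem.List.pyRange start (b_max + 1) 1) gt.length).map (fun t => start :: t))
                  ++ cwr (PySem.List.pyRange (start + 1) (b_max + 1) 1) (gt.length + 1) := by
              rw [show (gh :: gt).length = gt.length + 1 from rfl, cwr,
                  ← PySem.List.pyRange_one_cons h]
            rw [hcwr]
            simp only [List.map_append, List.map_map]
            congr 1
            apply List.map_congr_left
            intro t _
            simp [valFold, List.append_assoc]
          · have hle : b_max + 1 ≤ start := by omega
            rw [PySem.List.pyRange_one_eq_nil hle]
            simp [dfsB, PySem.List.pyRange_one_eq_nil hle, cwr]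

theorem idx_fold_gen (p : Int) (tp : List Int) :
    ∀ (ga gb pa pb : List Int) (a val : Int),
      a = (pa.length : Int) → a = (pb.length : Int) → ga.length = gb.length →
      (PySem.List.pyRange a (a + ga.length) 1).foldl
          (fun val j =>
            PySem.Int.mod
              (val + PySem.List.pyGetD (pa ++ ga) j 0 *
                     PySem.List.pyGetD tp (PySem.List.pyGetD (pb ++ gb) j 0) 0) p) val
        = valFold tp p ga gb val := by
  intro ga
  induction ga with
  | nil =>
      intro gb pa pb a val ha hb hlen
      have : gb = [] := List.eq_nil_of_length_eq_zero (by simpa using hlen.symm)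
      subst this
      rw [show a + ((List.length ([] : List Int) : Int)) = a by simp,
          PySem.List.pyRange_one_eq_nil le_rfl]
      simp [valFold]
  | cons gh gt ihg =>
      intro gb pa pb a val ha hb hlen
      cases gb with
      | nil => simp at hlen
      | cons bh bt =>
        have hlen' : gt.length = bt.length := by simpa using hlen
        have hlt : a < a + ((gh :: gt).length : Int) := by simp
        rw [PySem.List.pyRange_one_cons hlt, List.foldl_cons]
        have hga : PySem.List.pyGetD (pa ++ gh :: gt) a 0 = gh := by
          rw [ha, PySem.List.pyGetD_natCast]
          simp [List.getD_eq_getElem?_getD, List.getElem?_append_right]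
        have hgb : PySem.List.pyGetD (pb ++ bh :: bt) a 0 = bh := by
          rw [hb, PySem.List.pyGetD_natCast]
          simp [List.getD_eq_getElem?_getD, List.getElem?_append_right]
        rw [hga, hgb]
        have hrange : a + ((gh :: gt).length : Int) = (a + 1) + (gt.length : Int) := by
          simp; omega
        rw [hrange]
        have hpa : pa ++ gh :: gt = (pa ++ [gh]) ++ gt := by simp
        have hpb : pb ++ bh :: bt = (pb ++ [bh]) ++ bt := by simp
        rw [hpa, hpb,
            ihg bt (pa ++ [gh]) (pb ++ [bh]) (a + 1)
              (PySem.Int.mod (val + gh * PySem.List.pyGetD tp bh 0) p)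
              (by simp [ha]) (by simp [hb]) hlen']
        simp [valFold]

theorem enumerate_sub_PB_spec : Claim_equal_enumerate_sub_PB := by
  intro k_sub p b_max g_full_k k_full _ hpre
  unfold Spec_enumerate_sub_PB enumerate_sub_PB enumerate_sub_PB_alt
  cases g_full_k with
  | none => rfl
  | some g =>
    have hk : 0 ≤ k_sub := by
      rcases hpre with h | ⟨h, _⟩
      · exact absurd h (by simp)
      · exact h
    simp only
    set g_pows := (PySem.List.pyRange 0 k_sub 1).map (fun j => pyPowMod g j.toNat p) with hgp
    set tp := (PySem.List.pyRange 0 (b_max + 1) 1).map (fun b => pyPowMod 2 b.toNat p) with htp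
    have hlen : g_pows.length = k_sub.toNat := by
      simp [hgp, PySem.List.length_pyRange_one]
    rw [dfs_spec p b_max tp g_pows (b_max + 1 - 0).toNat 0 [] 0 le_rfl, hlen]
    apply List.map_congr_left
    intro B hB
    have hBlen : B.length = k_sub.toNat := cwr_length_mem _ _ B hB
    simp only [List.nil_append]
    congr 1
    have hrw : PySem.List.pyRange 0 k_sub 1
        = PySem.List.pyRange 0 (0 + (g_pows.length : Int)) 1 := by
      rw [hlen]; congr 1; omega
    rw [hrw]
    have := idx_fold_gen p tp g_pows B [] [] 0 0 (by simp) (by simp)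
      (by rw [hlen, hBlen])
    simpa using this
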